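-- pv_equiv track=rewrite | github.com/botcs/detectron2 | detectron2/evaluation/custom_evaluation/assignment.py | already_assigned
-- ===== SOURCE A (Python) =====
-- def already_assigned(gt_instances, pred_instances):
--     # Sanity check for cases when assignment is called multiple times
--     any_assigned = any(
--         "assigned_pred" in gt_inst for gt_inst in gt_instances
--     ) or any(
--         "assigned_gt" in pred_inst for pred_inst in pred_instances
--     )
--
--     all_assigned = all(
--         "assigned_pred" in gt_inst for gt_inst in gt_instances
--     ) and all(
--         "assigned_gt" in pred_inst for pred_inst in pred_instances
--     )
--
--     assert any_assigned == all_assigned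
--     return all_assigned
-- ===== SOURCE B (Python) =====
-- def already_assigned(gt_instances, pred_instances):
--     # Reference-element check: take the first instance's assignment status as the
--     # reference and assert every other instance matches it; no any/all scans.
--     keyed = [(inst, "assigned_pred") for inst in gt_instances]
--     keyed += [(inst, "assigned_gt") for inst in pred_instances]
--     assert keyed
--     first = keyed[0][1] in keyed[0][0]
--     for inst, key in keyed[1:]:
--         assert (key in inst) == first
--     return first
-- ===== Notes on version B (the rewrite author's own statement) =====
-- stated objective: alternative
-- what changed: Instead of four any/all scans compared by an assert, B takes the first instance's assignment status as a reference value, asserts each remaining instance matches it inside one loop, and returns the reference; Pre_ excludes exactly the inputs where A's assert fails (mixed status, or both lists empty).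
import Mathlib
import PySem

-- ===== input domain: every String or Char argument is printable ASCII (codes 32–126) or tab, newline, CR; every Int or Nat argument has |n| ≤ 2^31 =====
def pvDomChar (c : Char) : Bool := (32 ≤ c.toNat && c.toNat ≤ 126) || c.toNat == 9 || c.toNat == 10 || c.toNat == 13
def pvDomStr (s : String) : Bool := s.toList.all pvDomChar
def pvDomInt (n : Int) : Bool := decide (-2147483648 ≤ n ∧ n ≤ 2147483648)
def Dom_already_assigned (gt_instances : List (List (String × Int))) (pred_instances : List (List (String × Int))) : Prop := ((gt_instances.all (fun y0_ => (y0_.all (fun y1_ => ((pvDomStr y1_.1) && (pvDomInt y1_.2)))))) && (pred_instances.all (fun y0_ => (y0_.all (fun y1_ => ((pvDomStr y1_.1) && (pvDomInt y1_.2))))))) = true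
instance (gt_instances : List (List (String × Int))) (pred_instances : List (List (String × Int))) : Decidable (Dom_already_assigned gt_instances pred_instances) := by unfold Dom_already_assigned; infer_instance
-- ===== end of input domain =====

-- ===== PORT A =====
-- B replaces the four any/all scans by a reference-element check (first instance's
-- status, verified against all others); Pre_ excludes inputs where A's assert fails.
-- 'key in dict' = key among the first components of the association list
def pvHasKey (inst : List (String × Int)) (k : String) : Bool :=
  inst.any (fun kv => kv.1 == k)

def already_assigned (gt_instances : List (List (String × Int))) (pred_instances : List (List (String × Int))) : Bool :=
  let any_assigned :=
    (gt_instances.any (fun gt_inst => pvHasKey gt_inst "assigned_pred")) ||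
    (pred_instances.any (fun pred_inst => pvHasKey pred_inst "assigned_gt"))
  let all_assigned :=
    (gt_instances.all (fun gt_inst => pvHasKey gt_inst "assigned_pred")) &&
    (pred_instances.all (fun pred_inst => pvHasKey pred_inst "assigned_gt"))
  -- assert any_assigned == all_assigned  (failure excluded by Pre_)
  let _ := any_assigned
  all_assigned

-- ===== PORT B =====
def already_assigned_alt (gt_instances : List (List (String × Int))) (pred_instances : List (List (String × Int))) : Bool :=
  let keyed :=
    (gt_instances.map (fun inst => (inst, "assigned_pred"))) ++
    (pred_instances.map (fun inst => (inst, "assigned_gt")))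
  -- assert keyed  (empty input excluded by Pre_)
  match keyed with
  | [] => false
  | (inst0, key0) :: rest =>
    let first := pvHasKey inst0 key0
    -- for inst, key in keyed[1:]: assert (key in inst) == first  (failure excluded by Pre_)
    let _ := rest.all (fun p => pvHasKey p.1 p.2 == first)
    first

-- ===== PRECONDITION & SPEC =====
-- Pre_ excludes exactly the inputs on which A raises AssertionError: those where
-- some but not all instances carry their assignment key, and the empty/empty input
-- (there any=False, all=True); B also raises AssertionError on all of those.
def Pre_already_assigned (gt_instances : List (List (String × Int))) (pred_instances : List (List (String × Int))) : Prop :=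
  ((gt_instances.any (fun gt_inst => pvHasKey gt_inst "assigned_pred")) ||
   (pred_instances.any (fun pred_inst => pvHasKey pred_inst "assigned_gt")))
  =
  ((gt_instances.all (fun gt_inst => pvHasKey gt_inst "assigned_pred")) &&
   (pred_instances.all (fun pred_inst => pvHasKey pred_inst "assigned_gt")))
instance (gt_instances : List (List (String × Int))) (pred_instances : List (List (String × Int))) : Decidable (Pre_already_assigned gt_instances pred_instances) := by unfold Pre_already_assigned; infer_instance

def pvWitness_already_assigned : (List (List (String × Int))) × (List (List (String × Int))) :=
  ([[("assigned_pred", 0)]], [[("assigned_gt", 1)]])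

def Spec_already_assigned (gt_instances : List (List (String × Int))) (pred_instances : List (List (String × Int))) (out : Bool) : Prop := out = already_assigned_alt gt_instances pred_instances
instance (gt_instances : List (List (String × Int))) (pred_instances : List (List (String × Int))) (out : Bool) : Decidable (Spec_already_assigned gt_instances pred_instances out) := by unfold Spec_already_assigned; infer_instance

-- ===== CLAIM (what is proved, stated in full; the proofs are below) =====
def Claim_equal_already_assigned : Prop := ∀ (gt_instances : List (List (String × Int))) (pred_instances : List (List (String × Int))), Dom_already_assigned gt_instances pred_instances → Pre_already_assigned gt_instances pred_instances → Spec_already_assigned gt_instances pred_instances (already_assigned gt_instances pred_instances)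

-- ===== LEMMAS AND PROOFS =====

-- if any = all over a list of flags, then all equals the head flag (default false
-- arises only in the empty case, which contradicts any = all)
theorem pv_all_eq_head (l : List Bool) (h : l.any id = l.all id) :
    l.all id = (l.headD false) := by
  cases l with
  | nil => simp at h
  | cons b t =>
    cases b with
    | false => simp
    | true =>
      simp only [List.any_cons, id, Bool.true_or] at h
      simp [← h]

-- ===== VERDICT (by name: the statement is the Claim_ definition above) =====
theorem already_assigned_spec : Claim_equal_already_assigned := by
  intro gt pred _ hpre
  unfold Spec_already_assigned already_assigned already_assigned_alt
  unfold Pre_already_assigned at hpre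
  have h := pv_all_eq_head
    ((gt.map (fun i => pvHasKey i "assigned_pred")) ++
     (pred.map (fun i => pvHasKey i "assigned_gt")))
    (by simpa [List.any_append, List.all_append, List.any_map, List.all_map] using hpre)
  cases gt with
  | cons i gs =>
    simp only [List.map_cons, List.cons_append, List.headD_cons, List.all_cons,
      List.all_append, List.all_map, id_eq, Function.comp_def] at h
    simpa only [List.all_cons, Bool.and_assoc] using h
  | nil =>
    cases pred with
    | nil => simp at hpre
    | cons p ps =>
      simp only [List.map_nil, List.map_cons, List.nil_append, List.headD_cons,
        List.all_cons, List.all_map, id_eq, Function.comp_def] at h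
      simpa only [List.all_nil, List.all_cons, Bool.true_and] using h
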